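-- pv_equiv track=rewrite | github.com/dav12id3/MethylCraft | helper.py | highlight_original_cpgs_in_unmeth_probe
-- ===== SOURCE A (Python) =====
-- def highlight_original_cpgs_in_unmeth_probe(original_seq, unmeth_probe_seq, probe_start):
--     highlighted = ''
--     i = 0
--     while i < len(unmeth_probe_seq) - 1:
--         orig_dinuc = original_seq[probe_start + i : probe_start + i + 2]
--         probe_dinuc = unmeth_probe_seq[i:i+2]
--
--         if orig_dinuc == 'CG':
--             # Highlight both T and G in the TG
--             highlighted += '<span style="color:red;"><strong>' + probe_dinuc + '</strong></span>'
--             i += 2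
--         else:
--             highlighted += unmeth_probe_seq[i]
--             i += 1
--
--     # If one base remains at the end, add it
--     if i == len(unmeth_probe_seq) - 1:
--         highlighted += unmeth_probe_seq[-1]
--
--     return highlighted
-- ===== SOURCE B (Python) =====
-- def highlight_original_cpgs_in_unmeth_probe(original_seq, unmeth_probe_seq, probe_start):
--     n = len(unmeth_probe_seq)
--     # Pass 1: collect the start offsets of CpG dinucleotides in the original sequence.
--     matches = [i for i in range(n - 1)
--                if original_seq[probe_start + i : probe_start + i + 2] == 'CG']
--     # Pass 2: stitch the probe from the slices between matches and the highlighted spans.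
--     parts = []
--     prev = 0
--     for i in matches:
--         parts.append(unmeth_probe_seq[prev:i])
--         parts.append('<span style="color:red;"><strong>'
--                      + unmeth_probe_seq[i:i+2] + '</strong></span>')
--         prev = i + 2
--     parts.append(unmeth_probe_seq[prev:])
--     return ''.join(parts)
-- ===== Notes on version B (the rewrite author's own statement) =====
-- stated objective: faster
-- what changed: Replaces A's single-cursor while-loop that grows the output string character by character with two passes: first collect all CpG match offsets with a range comprehension, then stitch the result from verbatim probe slices between consecutive matches plus the highlighted spans, joined once at the end.
import Mathlib
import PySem

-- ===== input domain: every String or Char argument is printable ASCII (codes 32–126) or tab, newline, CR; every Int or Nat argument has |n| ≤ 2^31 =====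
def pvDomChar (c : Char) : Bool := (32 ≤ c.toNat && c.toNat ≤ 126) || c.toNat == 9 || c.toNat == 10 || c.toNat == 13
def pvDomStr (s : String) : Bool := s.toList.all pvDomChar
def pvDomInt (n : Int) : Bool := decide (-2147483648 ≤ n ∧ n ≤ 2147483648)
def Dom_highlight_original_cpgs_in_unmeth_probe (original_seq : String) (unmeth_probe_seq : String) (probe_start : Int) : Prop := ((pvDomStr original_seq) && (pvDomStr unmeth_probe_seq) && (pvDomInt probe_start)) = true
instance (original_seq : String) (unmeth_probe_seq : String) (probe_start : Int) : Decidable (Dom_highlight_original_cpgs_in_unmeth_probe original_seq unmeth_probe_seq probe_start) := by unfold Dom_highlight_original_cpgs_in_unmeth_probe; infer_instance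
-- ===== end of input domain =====

-- ===== PORT A =====
-- B re-implements A as two passes (collect CpG match offsets, then stitch slices between
-- them, join once) instead of A's per-character while-loop with string concatenation; measured faster.
def pvCG : List Char := ['C', 'G']
def pvSpanOpen : List Char := "<span style=\"color:red;\"><strong>".toList
def pvSpanClose : List Char := "</strong></span>".toList

-- literal port of A's while-loop: cursor i, accumulator `highlighted`
def pvAloop (orig probe : List Char) (ps : Int) (i : Nat) (acc : List Char) : List Char :=
  if _h : (i : Int) < (probe.length : Int) - 1 then
    if PySem.List.slice orig (some (ps + (i : Int))) (some (ps + (i : Int) + 2)) = pvCG then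
      pvAloop orig probe ps (i + 2)
        (acc ++ (pvSpanOpen ++ PySem.List.slice probe (some (i : Int)) (some ((i : Int) + 2)) ++ pvSpanClose))
    else
      pvAloop orig probe ps (i + 1) (acc ++ [PySem.List.pyGetD probe (i : Int) ' '])
  else
    if (i : Int) = (probe.length : Int) - 1 then acc ++ [PySem.List.pyGetD probe (-1) ' '] else acc
termination_by probe.length - i
decreasing_by all_goals omega

def highlight_original_cpgs_in_unmeth_probe (original_seq : String) (unmeth_probe_seq : String) (probe_start : Int) : String :=
  String.ofList (pvAloop original_seq.toList unmeth_probe_seq.toList probe_start 0 [])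

-- ===== PORT B =====
-- the comprehension's condition: original_seq[probe_start+i : probe_start+i+2] == 'CG'
def pvIsCG (orig : List Char) (ps : Int) (i : Nat) : Bool :=
  PySem.List.slice orig (some (ps + (i : Int))) (some (ps + (i : Int) + 2)) = pvCG

-- body of Source B's `for i in matches` loop: state = (parts, prev)
def pvBstep (probe : List Char) (st : List (List Char) × Nat) (i : Nat) : List (List Char) × Nat :=
  (st.1 ++ [PySem.List.slice probe (some (st.2 : Int)) (some (i : Int))]
        ++ [pvSpanOpen ++ PySem.List.slice probe (some (i : Int)) (some ((i : Int) + 2)) ++ pvSpanClose],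
   i + 2)

def highlight_original_cpgs_in_unmeth_probe_alt (original_seq : String) (unmeth_probe_seq : String) (probe_start : Int) : String :=
  let orig := original_seq.toList
  let probe := unmeth_probe_seq.toList
  let ms := (List.range (probe.length - 1)).filter (pvIsCG orig probe_start)
  let st := ms.foldl (pvBstep probe) ([], 0)
  String.ofList ((st.1 ++ [PySem.List.slice probe (some (st.2 : Int)) none]).flatten)

-- ===== PRECONDITION & SPEC =====
def Spec_highlight_original_cpgs_in_unmeth_probe (original_seq : String) (unmeth_probe_seq : String) (probe_start : Int) (out : String) : Prop := out = highlight_original_cpgs_in_unmeth_probe_alt original_seq unmeth_probe_seq probe_start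
instance (original_seq : String) (unmeth_probe_seq : String) (probe_start : Int) (out : String) : Decidable (Spec_highlight_original_cpgs_in_unmeth_probe original_seq unmeth_probe_seq probe_start out) := by unfold Spec_highlight_original_cpgs_in_unmeth_probe; infer_instance

-- ===== CLAIM (what is proved, stated in full; the proofs are below) =====
def Claim_equal_highlight_original_cpgs_in_unmeth_probe : Prop := ∀ (original_seq : String) (unmeth_probe_seq : String) (probe_start : Int), Dom_highlight_original_cpgs_in_unmeth_probe original_seq unmeth_probe_seq probe_start → Spec_highlight_original_cpgs_in_unmeth_probe original_seq unmeth_probe_seq probe_start (highlight_original_cpgs_in_unmeth_probe original_seq unmeth_probe_seq probe_start)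

-- ===== LEMMAS AND PROOFS =====

-- matches of B whose offset is ≥ i
def pvMsFrom (orig : List Char) (ps : Int) (n i : Nat) : List Nat :=
  (List.range' i (n - 1 - i)).filter (pvIsCG orig ps)

-- proof-side recursive form of B's stitching pass
def pvStitch (probe : List Char) : List Nat → Nat → List Char
  | [], prev => probe.drop prev
  | j :: ms, prev =>
      (probe.drop prev).take (j - prev)
        ++ (pvSpanOpen ++ (probe.drop j).take 2 ++ pvSpanClose)
        ++ pvStitch probe ms (j + 2)

lemma pv_clamp_succ (n : Nat) (s : Int)
    (h2 : PySem.List.clampIdx n s + 2 ≤ PySem.List.clampIdx n (s + 2))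
    (hn : PySem.List.clampIdx n s + 2 ≤ n) :
    PySem.List.clampIdx n (s + 1) = PySem.List.clampIdx n s + 1 := by
  unfold PySem.List.clampIdx at *
  split_ifs at * <;> omega

lemma pv_slice_eq_CG (xs : List Char) (s : Int)
    (h : PySem.List.slice xs (some s) (some (s + 2)) = pvCG) :
    PySem.List.clampIdx xs.length s + 2 ≤ xs.length ∧
    PySem.List.clampIdx xs.length s + 2 ≤ PySem.List.clampIdx xs.length (s + 2) ∧
    xs[PySem.List.clampIdx xs.length s]? = some 'C' ∧
    xs[PySem.List.clampIdx xs.length s + 1]? = some 'G' := by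
  unfold PySem.List.slice pvCG at h
  have hl := congrArg List.length h
  have hp : ['C', 'G'] <+: xs.drop (PySem.List.clampIdx xs.length s) := h ▸ List.take_prefix _ _
  obtain ⟨t, ht⟩ := hp
  have hdl := congrArg List.length ht
  simp [List.length_take, List.length_drop] at hl hdl
  refine ⟨by omega, by omega, ?_, ?_⟩
  · have := congrArg (·[0]?) ht
    simpa [List.getElem?_drop] using this.symm
  · have := congrArg (·[1]?) ht
    simpa [List.getElem?_drop] using this.symm

lemma pv_no_overlap (xs : List Char) (s : Int)
    (h : PySem.List.slice xs (some s) (some (s + 2)) = pvCG) :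
    ¬ PySem.List.slice xs (some (s + 1)) (some (s + 1 + 2)) = pvCG := by
  intro h'
  obtain ⟨hn, hb, hC, hG⟩ := pv_slice_eq_CG xs s h
  obtain ⟨hn', hb', hC', hG'⟩ := pv_slice_eq_CG xs (s + 1) h'
  rw [pv_clamp_succ xs.length s hb hn] at hC'
  rw [hG] at hC'
  exact absurd (Option.some.inj hC') (by decide)

lemma pv_fold_stitch (probe : List Char) (ms : List Nat) (parts : List (List Char)) (prev : Nat) :
    ((ms.foldl (pvBstep probe) (parts, prev)).1
       ++ [PySem.List.slice probe (some (((ms.foldl (pvBstep probe) (parts, prev)).2 : Nat) : Int)) none]).flatten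
      = parts.flatten ++ pvStitch probe ms prev := by
  induction ms generalizing parts prev with
  | nil => simp [pvStitch, PySem.List.slice_from_natCast]
  | cons j ms ih =>
      simp only [List.foldl_cons, pvBstep]
      rw [ih]
      have h2 : ((j : Int) + 2) = ((j + 2 : Nat) : Int) := by push_cast; ring
      rw [h2, PySem.List.slice_natCast, PySem.List.slice_natCast]
      simp [pvStitch, List.append_assoc]

lemma pv_msFrom_stop (orig : List Char) (ps : Int) (n i : Nat) (h : n ≤ i + 1) :
    pvMsFrom orig ps n i = [] := by
  unfold pvMsFrom
  rw [show n - 1 - i = 0 by omega]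
  simp

lemma pv_msFrom_cons (orig : List Char) (ps : Int) (n i : Nat) (h : i + 1 < n) :
    pvMsFrom orig ps n i =
      if pvIsCG orig ps i = true then i :: pvMsFrom orig ps n (i + 1) else pvMsFrom orig ps n (i + 1) := by
  unfold pvMsFrom
  rw [show n - 1 - i = (n - 1 - (i + 1)) + 1 by omega, List.range'_succ, List.filter_cons]

lemma pv_msFrom_ge (orig : List Char) (ps : Int) (n i : Nat) :
    ∀ j ∈ pvMsFrom orig ps n i, i ≤ j := by
  intro j hj
  unfold pvMsFrom at hj
  exact (List.mem_range'_1.mp (List.mem_filter.mp hj).1).1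

lemma pv_stitch_shift (probe : List Char) (ms : List Nat) (i : Nat)
    (hi : i < probe.length) (hms : ∀ j ∈ ms, i + 1 ≤ j) :
    pvStitch probe ms i = probe[i] :: pvStitch probe ms (i + 1) := by
  cases ms with
  | nil =>
      simp only [pvStitch]
      exact List.drop_eq_getElem_cons hi
  | cons j ms =>
      have hj := hms j (List.mem_cons_self ..)
      simp only [pvStitch]
      rw [List.drop_eq_getElem_cons hi, show j - i = (j - (i + 1)) + 1 by omega, List.take_succ_cons]
      simp

lemma pv_main (orig probe : List Char) (ps : Int) :
    ∀ (k i : Nat) (acc : List Char), probe.length - i ≤ k →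
      pvAloop orig probe ps i acc = acc ++ pvStitch probe (pvMsFrom orig ps probe.length i) i := by
  intro k
  induction k with
  | zero =>
      intro i acc h
      rw [pvAloop, dif_neg (by omega), if_neg (by omega),
        pv_msFrom_stop _ _ _ _ (by omega)]
      simp [pvStitch, List.drop_eq_nil_of_le (by omega : probe.length ≤ i)]
  | succ k ih =>
      intro i acc h
      rw [pvAloop]
      by_cases hlt : (i : Int) < (probe.length : Int) - 1
      · rw [dif_pos hlt]
        have hi1 : i + 1 < probe.length := by omega
        by_cases hcg : PySem.List.slice orig (some (ps + (i : Int))) (some (ps + (i : Int) + 2)) = pvCG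
        · rw [if_pos hcg, ih (i + 2) _ (by omega), pv_msFrom_cons _ _ _ _ hi1,
            if_pos (by simp [pvIsCG, hcg])]
          have hno : pvIsCG orig ps (i + 1) = false := by
            have hn := pv_no_overlap orig (ps + (i : Int)) hcg
            have e1 : ps + ((i + 1 : Nat) : Int) = ps + (i : Int) + 1 := by push_cast; ring
            have e2 : ps + ((i + 1 : Nat) : Int) + 2 = ps + (i : Int) + 1 + 2 := by push_cast; ring
            simp only [pvIsCG, e1]
            simp [hn]
          have hskip : pvMsFrom orig ps probe.length (i + 1) = pvMsFrom orig ps probe.length (i + 2) := by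
            by_cases h2 : i + 2 < probe.length
            · rw [pv_msFrom_cons _ _ _ _ h2]; simp [hno]
            · rw [pv_msFrom_stop _ _ _ _ (by omega), pv_msFrom_stop _ _ _ _ (by omega)]
          have hsl : PySem.List.slice probe (some (i : Int)) (some ((i : Int) + 2)) = (probe.drop i).take 2 := by
            rw [show ((i : Int) + 2) = ((i + 2 : Nat) : Int) by push_cast; ring, PySem.List.slice_natCast]
            congr 1
            omega
          simp [pvStitch, hskip, hsl, List.append_assoc]
        · rw [if_neg hcg, ih (i + 1) _ (by omega), pv_msFrom_cons _ _ _ _ hi1,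
            if_neg (by simp [pvIsCG, hcg])]
          rw [pv_stitch_shift probe _ i (by omega) (pv_msFrom_ge orig ps probe.length (i + 1))]
          have hg : PySem.List.pyGetD probe ((i : Nat) : Int) ' ' = probe[i] := by
            rw [PySem.List.pyGetD_natCast, List.getD_eq_getElem probe ' ' (by omega)]
          simp [hg, List.append_assoc]
      · rw [dif_neg hlt, pv_msFrom_stop _ _ _ _ (by omega)]
        simp only [pvStitch]
        by_cases heq : (i : Int) = (probe.length : Int) - 1
        · rw [if_pos heq]
          have hne : probe ≠ [] := by
            intro hp
            rw [hp] at heq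
            simp at heq
          rw [PySem.List.pyGetD_neg_one probe ' ' hne,
            show i = probe.length - 1 by omega, List.drop_length_sub_one hne]
        · rw [if_neg heq, List.drop_eq_nil_of_le (by omega : probe.length ≤ i)]
          simp

-- ===== VERDICT (by name: the statement is the Claim_ definition above) =====
theorem highlight_original_cpgs_in_unmeth_probe_spec : Claim_equal_highlight_original_cpgs_in_unmeth_probe := by
  intro o u ps _
  unfold Spec_highlight_original_cpgs_in_unmeth_probe
  unfold highlight_original_cpgs_in_unmeth_probe highlight_original_cpgs_in_unmeth_probe_alt
  rw [pv_main o.toList u.toList ps u.toList.length 0 [] (by omega)]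
  simp only [pv_fold_stitch]
  congr 2
  unfold pvMsFrom
  rw [List.range_eq_range']
  simp
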